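-- pv_equiv track=rewrite | github.com/daniel-reich/ubiquitous-fiesta | SxevRSmRcshgwnAKp_18.py | pricey_prod
-- ===== SOURCE A (Python) =====
-- def pricey_prod(d):
--   sorted_dict = sorted(d.items(), key=lambda x: x[1], reverse=True)
--   l = []
--   for item in sorted_dict:
--     if item[1] < 500:
--       return l
--     else:
--       l.append(item[0])
--
--   return l
-- ===== SOURCE B (Python) =====
-- def pricey_prod(d):
--   buckets = {}
--   for k, v in d.items():
--     if v >= 500:
--       buckets.setdefault(v, []).append(k)
--   return [k for v in sorted(buckets, reverse=True) for k in buckets[v]]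
-- ===== Notes on version B (the rewrite author's own statement) =====
-- stated objective: alternative
-- what changed: B groups the qualifying keys into a dict of value->keys buckets in one pass, sorts only the distinct values descending, and flattens the buckets, instead of A's sort-all-items-then-scan-with-early-return.
import Mathlib
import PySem

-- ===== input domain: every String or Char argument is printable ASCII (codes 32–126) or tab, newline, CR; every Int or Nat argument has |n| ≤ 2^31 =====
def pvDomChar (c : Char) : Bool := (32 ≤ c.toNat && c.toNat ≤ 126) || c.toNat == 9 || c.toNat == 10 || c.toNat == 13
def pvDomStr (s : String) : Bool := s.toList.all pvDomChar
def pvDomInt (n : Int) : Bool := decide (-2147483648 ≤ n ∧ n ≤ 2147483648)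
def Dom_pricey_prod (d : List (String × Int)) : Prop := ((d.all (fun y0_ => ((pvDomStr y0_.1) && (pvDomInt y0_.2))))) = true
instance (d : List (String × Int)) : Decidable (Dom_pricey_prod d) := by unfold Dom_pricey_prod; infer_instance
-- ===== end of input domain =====

-- B groups qualifying keys into value->keys buckets in one pass, sorts only the
-- distinct values descending and flattens, instead of A's sort-all-items-then-scan
-- with early return; proved to return the same list (objective: alternative).


-- ===== PORT A =====
-- the 'for item in sorted_dict' loop with the early 'return l'
def priceyLoopA (l : List String) (items : List (String × Int)) : List String :=
  match items with
  | [] => l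
  | it :: rest => if it.2 < 500 then l else priceyLoopA (l ++ [it.1]) rest

def pricey_prod (d : List (String × Int)) : List String :=
  priceyLoopA [] (PySem.List.sorted d (fun x => x.2) true)

-- ===== PORT B =====
-- buckets.setdefault(v, []).append(k) is Dict.modify v [] (· ++ [k]);
-- buckets[v] in the comprehension is ported as getD v [] — exact, since v ranges
-- over buckets' own keys, so the KeyError branch is unreachable.
def pricey_prod_alt (d : List (String × Int)) : List String :=
  let buckets := d.foldl
    (fun b kv => if 500 ≤ kv.2 then b.modify kv.2 ([] : List String) (fun l => l ++ [kv.1]) else b)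
    PySem.Dict.empty
  (PySem.List.sorted buckets.keys (fun v => v) true).flatMap (fun v => buckets.getD v [])

-- ===== PRECONDITION & SPEC =====
def Spec_pricey_prod (d : List (String × Int)) (out : List String) : Prop := out = pricey_prod_alt d
instance (d : List (String × Int)) (out : List String) : Decidable (Spec_pricey_prod d out) := by unfold Spec_pricey_prod; infer_instance

-- ===== CLAIM (what is proved, stated in full; the proofs are below) =====
def Claim_equal_pricey_prod : Prop := ∀ (d : List (String × Int)), Dom_pricey_prod d → Spec_pricey_prod d (pricey_prod d)

-- ===== LEMMAS AND PROOFS =====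

-- abbreviations used only by the proofs
def pvP (kv : String × Int) : Bool := decide (500 ≤ kv.2)
def pvB (a c : String × Int) : Bool := decide (c.2 < a.2)
def pvLt (a c : Int) : Bool := decide (c < a)
def pvR (a c : String × Int) : Prop := c.2 ≤ a.2

-- ---- A-side: the early-return loop over a desc-sorted list is filter-then-map ----
lemma pv_filter_nil {it : String × Int} {rest : List (String × Int)}
    (hlt : it.2 < 500) (hle : ∀ z ∈ rest, z.2 ≤ it.2) :
    rest.filter pvP = [] := by
  apply List.filter_eq_nil_iff.mpr
  intro z hz
  simp [pvP]
  have := hle z hz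
  omega

lemma pv_loopA (l : List String) (s : List (String × Int)) (hs : s.Pairwise pvR) :
    priceyLoopA l s = l ++ (s.filter pvP).map Prod.fst := by
  induction s generalizing l with
  | nil => simp [priceyLoopA]
  | cons it rest ih =>
    rcases List.pairwise_cons.mp hs with ⟨hle, htail⟩
    by_cases h : it.2 < 500
    · rw [priceyLoopA]
      simp only [h, if_true]
      have h1 : pvP it = false := by simp [pvP]; omega
      rw [List.filter_cons_of_neg (by simp [h1]), pv_filter_nil h hle]
      simp
    · rw [priceyLoopA]
      simp only [h]
      have h1 : pvP it = true := by simp [pvP]; omega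
      rw [ih _ htail, List.filter_cons_of_pos (by simp [h1])]
      simp

lemma pv_insertBy_pairwise (x : String × Int) (ys : List (String × Int))
    (hys : ys.Pairwise pvR) : (PySem.List.insertBy pvB x ys).Pairwise pvR := by
  induction ys with
  | nil => simp [PySem.List.insertBy]
  | cons y ys ih =>
    rcases List.pairwise_cons.mp hys with ⟨hle, htail⟩
    rw [PySem.List.insertBy]
    by_cases h : pvB x y = true
    · simp only [h, if_true]
      refine List.pairwise_cons.mpr ⟨?_, hys⟩
      intro z hz
      have hxy : y.2 < x.2 := by simpa [pvB] using h
      rcases List.mem_cons.mp hz with rfl | hz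
      · exact le_of_lt hxy
      · exact le_trans (hle z hz) (le_of_lt hxy)
    · simp only [h]
      refine List.pairwise_cons.mpr ⟨?_, ih htail⟩
      intro z hz
      rcases (PySem.List.mem_insertBy pvB x z ys).mp hz with rfl | hz
      · simp [pvB] at h; exact h
      · exact hle z hz

lemma pv_filter_insertBy (x : String × Int) (ys : List (String × Int))
    (hys : ys.Pairwise pvR) :
    (PySem.List.insertBy pvB x ys).filter pvP =
      if pvP x then PySem.List.insertBy pvB x (ys.filter pvP) else ys.filter pvP := by
  induction ys with
  | nil =>
    by_cases h : pvP x <;> simp [PySem.List.insertBy, h]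
  | cons y ys ih =>
    rcases List.pairwise_cons.mp hys with ⟨hle, htail⟩
    rw [PySem.List.insertBy]
    by_cases hb : pvB x y
    · rw [if_pos hb]
      have hxy : y.2 < x.2 := by simpa [pvB] using hb
      by_cases hpx : pvP x
      · rw [if_pos hpx, List.filter_cons_of_pos hpx]
        by_cases hpy : pvP y
        · rw [List.filter_cons_of_pos hpy, PySem.List.insertBy, if_pos hb]
        · have hpy' : pvP y = false := by simpa using hpy
          have hy5 : y.2 < 500 := by simp [pvP] at hpy'; omega
          rw [List.filter_cons_of_neg hpy, pv_filter_nil hy5 hle]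
          rfl
      · have hx5 : x.2 < 500 := by simp [pvP] at hpx; omega
        rw [if_neg hpx, List.filter_cons_of_neg hpx]
    · rw [if_neg hb]
      have hxy : x.2 ≤ y.2 := by simp [pvB] at hb; exact hb
      by_cases hpy : pvP y
      · rw [List.filter_cons_of_pos hpy, List.filter_cons_of_pos hpy, ih htail]
        by_cases hpx : pvP x
        · rw [if_pos hpx, if_pos hpx]
          simp [PySem.List.insertBy, hb]
        · rw [if_neg hpx, if_neg hpx]
      · rw [List.filter_cons_of_neg hpy, List.filter_cons_of_neg hpy, ih htail]

lemma pv_filter_foldl (xs : List (String × Int)) (acc : List (String × Int))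
    (hacc : acc.Pairwise pvR) :
    (xs.foldl (fun a x => PySem.List.insertBy pvB x a) acc).filter pvP =
      (xs.filter pvP).foldl (fun a x => PySem.List.insertBy pvB x a) (acc.filter pvP) := by
  induction xs generalizing acc with
  | nil => simp
  | cons x xs ih =>
    simp only [List.foldl_cons]
    rw [ih _ (pv_insertBy_pairwise x acc hacc), pv_filter_insertBy x acc hacc]
    by_cases hpx : pvP x
    · rw [List.filter_cons_of_pos hpx]
      simp [hpx]
    · rw [List.filter_cons_of_neg (by simp [hpx])]
      simp [hpx]

lemma pv_filter_sorted (d : List (String × Int)) :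
    (PySem.List.sorted d (fun x => x.2) true).filter pvP =
      PySem.List.sorted (d.filter pvP) (fun x => x.2) true := by
  rw [PySem.List.sorted_rev_eq_foldl_insertBy d (fun x => x.2),
    PySem.List.sorted_rev_eq_foldl_insertBy (d.filter pvP) (fun x => x.2)]
  have := pv_filter_foldl d [] (by simp)
  simpa [pvB] using this

-- ---- B-side: generic guarded fold = fold over the filtered list ----
lemma pv_foldl_if {α β : Type} (p : α → Bool) (g : β → α → β) (l : List α) (init : β) :
    l.foldl (fun b x => if p x then g b x else b) init = (l.filter p).foldl g init := by
  induction l generalizing init with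
  | nil => rfl
  | cons x l ih =>
    by_cases h : p x
    · rw [List.filter_cons_of_pos h]; simp [h, ih]
    · rw [List.filter_cons_of_neg (by simp [h])]; simp [h, ih]

-- ---- sorted of a right-appended element is an insertBy ----
lemma pv_sorted_append_pair (F : List (String × Int)) (x : String × Int) :
    PySem.List.sorted (F ++ [x]) (fun y => y.2) true =
      PySem.List.insertBy pvB x (PySem.List.sorted F (fun y => y.2) true) := by
  rw [PySem.List.sorted_rev_eq_foldl_insertBy (F ++ [x]) (fun y => y.2),
    PySem.List.sorted_rev_eq_foldl_insertBy F (fun y => y.2), List.foldl_append]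
  rfl

lemma pv_sorted_append_int (m : List Int) (v : Int) :
    PySem.List.sorted (m ++ [v]) (fun u => u) true =
      PySem.List.insertBy pvLt v (PySem.List.sorted m (fun u => u) true) := by
  rw [PySem.List.sorted_rev_eq_foldl_insertBy (m ++ [v]) (fun u => u),
    PySem.List.sorted_rev_eq_foldl_insertBy m (fun u => u), List.foldl_append]
  rfl

-- ---- insertBy positioning lemmas ----
lemma pv_insertBy_skip (x : String × Int) (B R : List (String × Int))
    (h : ∀ y ∈ B, ¬ y.2 < x.2) :
    PySem.List.insertBy pvB x (B ++ R) = B ++ PySem.List.insertBy pvB x R := by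
  induction B with
  | nil => rfl
  | cons y B ih =>
    rw [List.cons_append, PySem.List.insertBy, if_neg]
    · rw [ih (fun z hz => h z (List.mem_cons_of_mem _ hz))]; rfl
    · have := h y (List.mem_cons_self)
      simp [pvB, this]

lemma pv_insertBy_front (x : String × Int) (L : List (String × Int))
    (h : ∀ y ∈ L, y.2 < x.2) :
    PySem.List.insertBy pvB x L = x :: L := by
  cases L with
  | nil => rfl
  | cons y L =>
    rw [PySem.List.insertBy, if_pos]
    simp [pvB, h y List.mem_cons_self]

-- ---- a bucket structure: flatMap over strictly descending values ----
lemma pv_ins_mem (vs : List Int) (x : String × Int) (bf : Int → List (String × Int))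
    (hpw : vs.Pairwise (· > ·))
    (hval : ∀ v ∈ vs, ∀ y ∈ bf v, y.2 = v)
    (hmem : x.2 ∈ vs) :
    PySem.List.insertBy pvB x (vs.flatMap bf) =
      vs.flatMap (fun v => if v = x.2 then bf v ++ [x] else bf v) := by
  induction vs with
  | nil => cases hmem
  | cons v vs ih =>
    rcases List.pairwise_cons.mp hpw with ⟨hgt, htail⟩
    rw [List.flatMap_cons, List.flatMap_cons]
    by_cases hv : v = x.2
    · rw [if_pos hv]
      rw [pv_insertBy_skip x _ _
        (fun y hy => by have := hval v List.mem_cons_self y hy; omega)]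
      rw [pv_insertBy_front x _ ?front]
      · have : vs.flatMap (fun u => if u = x.2 then bf u ++ [x] else bf u) = vs.flatMap bf := by
          apply List.flatMap_congr
          intro u hu
          have : u ≠ x.2 := by have := hgt u hu; omega
          rw [if_neg this]
        rw [this]; simp
      case front =>
        intro y hy
        rcases List.mem_flatMap.mp hy with ⟨u, hu, hyu⟩
        have := hval u (List.mem_cons_of_mem _ hu) y hyu
        have := hgt u hu
        omega
    · have hx' : x.2 ∈ vs := by
        rcases List.mem_cons.mp hmem with h | h
        · exact absurd h.symm hv
        · exact h
      have hvx : x.2 < v := hgt _ hx'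
      rw [pv_insertBy_skip x _ _
        (fun y hy => by have := hval v List.mem_cons_self y hy; omega)]
      rw [ih htail (fun u hu => hval u (List.mem_cons_of_mem _ hu)) hx', if_neg hv]

lemma pv_ins_new (vs : List Int) (x : String × Int) (bf : Int → List (String × Int))
    (hpw : vs.Pairwise (· > ·))
    (hval : ∀ v ∈ vs, ∀ y ∈ bf v, y.2 = v)
    (hmem : x.2 ∉ vs) :
    PySem.List.insertBy pvB x (vs.flatMap bf) =
      (PySem.List.insertBy pvLt x.2 vs).flatMap (fun v => if v = x.2 then [x] else bf v) := by
  induction vs with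
  | nil => simp [PySem.List.insertBy]
  | cons v vs ih =>
    rcases List.pairwise_cons.mp hpw with ⟨hgt, htail⟩
    have hvne : v ≠ x.2 := fun h => hmem (h ▸ List.mem_cons_self)
    by_cases hlt : v < x.2
    · have h1 : PySem.List.insertBy pvLt x.2 (v :: vs) = x.2 :: v :: vs := by
        rw [PySem.List.insertBy, if_pos (by simp [pvLt, hlt])]
      rw [List.flatMap_cons, h1, List.flatMap_cons, List.flatMap_cons, if_pos rfl, if_neg hvne]
      rw [pv_insertBy_front x _ ?small]
      · have : vs.flatMap (fun u => if u = x.2 then [x] else bf u) = vs.flatMap bf := by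
          apply List.flatMap_congr
          intro u hu
          have : u ≠ x.2 := by have := hgt u hu; omega
          rw [if_neg this]
        rw [this]
        rfl
      case small =>
        intro y hy
        rcases List.mem_append.mp hy with hyv | hyr
        · have := hval v List.mem_cons_self y hyv; omega
        · rcases List.mem_flatMap.mp hyr with ⟨u, hu, hyu⟩
          have := hval u (List.mem_cons_of_mem _ hu) y hyu
          have := hgt u hu
          omega
    · have h1 : PySem.List.insertBy pvLt x.2 (v :: vs) = v :: PySem.List.insertBy pvLt x.2 vs := by
        rw [PySem.List.insertBy, if_neg (by simp [pvLt, hlt])]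
      rw [h1, List.flatMap_cons, List.flatMap_cons, if_neg hvne]
      rw [pv_insertBy_skip x _ _
        (fun y hy => by have := hval v List.mem_cons_self y hy; omega)]
      rw [ih htail (fun u hu => hval u (List.mem_cons_of_mem _ hu))
        (fun h => hmem (List.mem_cons_of_mem _ h))]

-- dedup of a right-appended element
lemma pv_dedup_append (l : List Int) (v : Int) :
    PySem.List.dedup (l ++ [v]) =
      if v ∈ l then PySem.List.dedup l else PySem.List.dedup l ++ [v] := by
  rw [PySem.List.dedup_eq_ofList, PySem.List.dedup_eq_ofList,
    PySem.Set.ofList_eq_foldl, PySem.Set.ofList_eq_foldl, List.foldl_append]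
  simp only [List.foldl_cons, List.foldl_nil]
  rw [PySem.Set.add, PySem.Set.contains]
  rw [← PySem.Set.ofList_eq_foldl]
  by_cases hv : v ∈ l
  · rw [if_pos, if_pos hv]
    simp [PySem.Set.mem_ofList, hv]
  · rw [if_neg, if_neg hv]
    simp [PySem.Set.mem_ofList, hv]

-- the desc-sorted distinct values are pairwise >
lemma pv_sorted_dedup_gt (l : List Int) :
    (PySem.List.sorted (PySem.List.dedup l) (fun u => u) true).Pairwise (· > ·) := by
  have h1 := PySem.List.sorted_pairwise_rev (PySem.List.dedup l) (fun u => u)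
  have h2 : (PySem.List.sorted (PySem.List.dedup l) (fun u => u) true).Nodup :=
    (PySem.List.sorted_perm (PySem.List.dedup l) (fun u => u) true).symm.nodup
      (PySem.List.nodup_dedup l)
  exact (h1.and h2).imp (fun h => by omega)

-- MAIN: a stable desc sort by value is the flatten of value buckets over distinct values desc
lemma pv_main (F : List (String × Int)) :
    PySem.List.sorted F (fun y => y.2) true =
      (PySem.List.sorted (PySem.List.dedup (F.map (fun y => y.2))) (fun u => u) true).flatMap
        (fun v => F.filter (fun kv => kv.2 == v)) := by
  induction F using List.reverseRecOn with
  | nil => rfl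
  | append_singleton F x ih =>
    have hpw := pv_sorted_dedup_gt (F.map (fun y => y.2))
    have hval : ∀ v ∈ PySem.List.sorted (PySem.List.dedup (F.map (fun y => y.2))) (fun u => u) true,
        ∀ y ∈ F.filter (fun kv => kv.2 == v), y.2 = v := by
      intro v _ y hy
      have := List.of_mem_filter hy
      simpa using this
    rw [pv_sorted_append_pair, ih, List.map_append]
    by_cases hx : x.2 ∈ F.map (fun y => y.2)
    · have hxS : x.2 ∈ PySem.List.sorted (PySem.List.dedup (F.map (fun y => y.2))) (fun u => u) true :=
        (PySem.List.mem_sorted _ _ _ _).mpr ((PySem.List.mem_dedup _ _).mpr hx)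
      rw [show (List.map (fun y => y.2) [x]) = [x.2] from rfl, pv_dedup_append, if_pos hx]
      rw [pv_ins_mem _ x _ hpw hval hxS]
      apply List.flatMap_congr
      intro v _
      rw [List.filter_append]
      by_cases hveq : v = x.2
      · rw [if_pos hveq]
        simp [List.filter, hveq]
      · rw [if_neg hveq]
        have : ((x.2 == v) = false) := by simp; omega
        simp [List.filter, this]
    · have hxS : x.2 ∉ PySem.List.sorted (PySem.List.dedup (F.map (fun y => y.2))) (fun u => u) true := by
        intro h
        exact hx ((PySem.List.mem_dedup _ _).mp ((PySem.List.mem_sorted _ _ _ _).mp h))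
      rw [show (List.map (fun y => y.2) [x]) = [x.2] from rfl, pv_dedup_append, if_neg hx,
        pv_sorted_append_int]
      rw [pv_ins_new _ x _ hpw hval hxS]
      apply List.flatMap_congr
      intro v hv
      have hF0 : ∀ w, w = x.2 → F.filter (fun kv => kv.2 == w) = [] := by
        intro w hw
        apply List.filter_eq_nil_iff.mpr
        intro kv hkv
        simp
        intro h
        exact hx (hw ▸ h ▸ List.mem_map_of_mem hkv)
      rw [List.filter_append]
      by_cases hveq : v = x.2
      · rw [if_pos hveq, hF0 v hveq]
        simp [List.filter, hveq]
      · rw [if_neg hveq]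
        have : ((x.2 == v) = false) := by simp; omega
        simp [List.filter, this]

-- B-side assembly: the guarded grouping fold over d is the plain grouping fold over d.filter pvP
lemma pv_alt_eq (d : List (String × Int)) :
    pricey_prod_alt d =
      ((PySem.List.sorted ((d.filter pvP).map (fun y => y.2) |> PySem.List.dedup) (fun u => u) true).flatMap
        (fun v => ((d.filter pvP).filter (fun kv => kv.2 == v)))).map Prod.fst := by
  unfold pricey_prod_alt
  have hguard : (fun (b : PySem.Dict Int (List String)) (kv : String × Int) =>
      if 500 ≤ kv.2 then b.modify kv.2 ([] : List String) (fun l => l ++ [kv.1]) else b) =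
      (fun b kv => if pvP kv then b.modify kv.2 ([] : List String) (fun l => l ++ [kv.1]) else b) := by
    funext b kv
    simp [pvP]
  rw [hguard, pv_foldl_if pvP (fun (b : PySem.Dict Int (List String)) (kv : String × Int) =>
    b.modify kv.2 ([] : List String) (fun l => l ++ [kv.1]))]
  have hkeys := PySem.Dict.keys_foldl_modify_key (d.filter pvP) (fun kv => kv.2)
    ([] : List String) (fun _ kv => fun l => l ++ [kv.1]) PySem.Dict.empty
  have hkeys' : ((d.filter pvP).foldl
      (fun b kv => b.modify kv.2 ([] : List String) (fun l => l ++ [kv.1])) PySem.Dict.empty).keys =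
      PySem.List.dedup ((d.filter pvP).map (fun y => y.2)) := by
    rw [hkeys, PySem.Dict.keys_empty, PySem.List.dedup_eq_ofList, PySem.Set.ofList_eq_foldl]
    rfl
  have hgetD : ∀ v : Int, ((d.filter pvP).foldl
      (fun b kv => b.modify kv.2 ([] : List String) (fun l => l ++ [kv.1])) PySem.Dict.empty).getD v [] =
      ((d.filter pvP).filter (fun kv => kv.2 == v)).map Prod.fst := by
    intro v
    have hswap : ((d.filter pvP).foldl
        (fun b kv => b.modify kv.2 ([] : List String) (fun l => l ++ [kv.1])) PySem.Dict.empty) =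
        (((d.filter pvP).map Prod.swap).foldl
          (fun b p => b.modify p.1 ([] : List String) (fun l => l ++ [p.2])) PySem.Dict.empty) := by
      rw [List.foldl_map]
      rfl
    rw [hswap, PySem.Dict.getD_foldl_modify_append, PySem.Dict.getD_empty, List.filter_map]
    simp [Function.comp, List.map_map]
  simp only [hkeys']
  rw [List.map_flatMap]
  apply List.flatMap_congr
  intro v _
  exact hgetD v

-- ===== VERDICT (by name: the statement is the Claim_ definition above) =====
theorem pricey_prod_spec : Claim_equal_pricey_prod := by
  intro d _
  show pricey_prod d = pricey_prod_alt d
  unfold pricey_prod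
  have hpw : (PySem.List.sorted d (fun x => x.2) true).Pairwise pvR :=
    PySem.List.sorted_pairwise_rev d (fun x => x.2)
  rw [pv_loopA [] _ hpw, pv_filter_sorted, List.nil_append, pv_alt_eq, ← pv_main]
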